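-- pv_equiv track=rewrite | github.com/Hecate58/BreachRadar | utils/darkweb_monitor.py | determine_breach_severity
-- ===== SOURCE A (Python) =====
-- def determine_breach_severity(data_classes):
--     """
--     Détermine la sévérité d'une violation en fonction des classes de données.
--
--     Args:
--         data_classes (list): Liste des classes de données
--
--     Returns:
--         str: Niveau de sévérité (Élevée, Moyenne, Faible)
--     """
--     if not data_classes:
--         return "Moyenne"
--
--     # Classes de données à haut risque
--     high_risk_classes = [
--         "Passwords", "Password hints", "Credit cards", "Banking details",
--         "Financial information", "Social security numbers", "Identity documents"
--     ]
--
--     # Classes de données à risque moyen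
--     medium_risk_classes = [
--         "Email addresses", "Usernames", "Phone numbers", "Physical addresses",
--         "IP addresses", "Employment information", "Education information"
--     ]
--
--     # Vérifier la présence de classes à haut risque
--     if any(high_class in data_classes for high_class in high_risk_classes):
--         return "Élevée"
--
--     # Vérifier la présence de classes à risque moyen
--     if any(medium_class in data_classes for medium_class in medium_risk_classes):
--         return "Moyenne"
--
--     # Par défaut
--     return "Faible"
-- ===== SOURCE B (Python) =====
-- _SEVERITY = {
--     "Passwords": 2, "Password hints": 2, "Credit cards": 2, "Banking details": 2,
--     "Financial information": 2, "Social security numbers": 2, "Identity documents": 2,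
--     "Email addresses": 1, "Usernames": 1, "Phone numbers": 1, "Physical addresses": 1,
--     "IP addresses": 1, "Employment information": 1, "Education information": 1,
-- }
--
--
-- def determine_breach_severity(data_classes):
--     if not data_classes:
--         return "Moyenne"
--     best = 0
--     for cls in data_classes:
--         best = max(best, _SEVERITY.get(cls, 0))
--     return "Élevée" if best == 2 else ("Moyenne" if best == 1 else "Faible")
-- ===== Notes on version B (the rewrite author's own statement) =====
-- stated objective: idiomatic
-- what changed: Replaces the two any-scans over hard-coded risk lists (each membership-testing the input) by a single pass over the input that takes the max rank found in one severity dict, then maps the max rank to the label.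
import Mathlib
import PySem

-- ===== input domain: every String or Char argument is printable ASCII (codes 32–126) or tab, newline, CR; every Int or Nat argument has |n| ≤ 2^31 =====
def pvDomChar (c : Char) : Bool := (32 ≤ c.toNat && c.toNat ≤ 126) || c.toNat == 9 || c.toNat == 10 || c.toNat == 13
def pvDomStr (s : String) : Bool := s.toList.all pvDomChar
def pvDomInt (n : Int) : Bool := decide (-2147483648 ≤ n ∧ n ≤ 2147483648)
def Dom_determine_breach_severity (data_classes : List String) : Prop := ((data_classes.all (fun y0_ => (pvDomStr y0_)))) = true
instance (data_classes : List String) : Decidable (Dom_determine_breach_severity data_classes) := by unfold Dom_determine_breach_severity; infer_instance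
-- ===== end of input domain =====

-- B replaces A's two any-scans over hard-coded risk lists by a single pass over the input
-- taking the maximum rank from one severity table, then mapping the rank to the label (idiomatic).

-- ===== PORT A =====
def pvHighRiskClasses : List String :=
  ["Passwords", "Password hints", "Credit cards", "Banking details",
   "Financial information", "Social security numbers", "Identity documents"]

def pvMediumRiskClasses : List String :=
  ["Email addresses", "Usernames", "Phone numbers", "Physical addresses",
   "IP addresses", "Employment information", "Education information"]

def determine_breach_severity (data_classes : List String) : String :=
  if data_classes = [] then "Moyenne"
  else if pvHighRiskClasses.any (fun high_class => data_classes.contains high_class) then "Élevée"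
  else if pvMediumRiskClasses.any (fun medium_class => data_classes.contains medium_class) then "Moyenne"
  else "Faible"

-- ===== PORT B =====
def pvSeverityDict : PySem.Dict String Nat :=
  PySem.Dict.ofList
    [("Passwords", 2), ("Password hints", 2), ("Credit cards", 2), ("Banking details", 2),
     ("Financial information", 2), ("Social security numbers", 2), ("Identity documents", 2),
     ("Email addresses", 1), ("Usernames", 1), ("Phone numbers", 1), ("Physical addresses", 1),
     ("IP addresses", 1), ("Employment information", 1), ("Education information", 1)]

def determine_breach_severity_alt (data_classes : List String) : String :=
  if data_classes = [] then "Moyenne"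
  else
    let best := data_classes.foldl (fun b cls => max b (pvSeverityDict.getD cls 0)) 0
    if best = 2 then "Élevée" else if best = 1 then "Moyenne" else "Faible"

-- ===== PRECONDITION & SPEC =====
def Spec_determine_breach_severity (data_classes : List String) (out : String) : Prop := out = determine_breach_severity_alt data_classes
instance (data_classes : List String) (out : String) : Decidable (Spec_determine_breach_severity data_classes out) := by unfold Spec_determine_breach_severity; infer_instance

-- ===== CLAIM (what is proved, stated in full; the proofs are below) =====
def Claim_equal_determine_breach_severity : Prop := ∀ (data_classes : List String), Dom_determine_breach_severity data_classes → Spec_determine_breach_severity data_classes (determine_breach_severity data_classes)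

-- ===== LEMMAS AND PROOFS =====

theorem pvSev_mk : pvSeverityDict = PySem.Dict.mk
    [("Passwords", 2), ("Password hints", 2), ("Credit cards", 2), ("Banking details", 2),
     ("Financial information", 2), ("Social security numbers", 2), ("Identity documents", 2),
     ("Email addresses", 1), ("Usernames", 1), ("Phone numbers", 1), ("Physical addresses", 1),
     ("IP addresses", 1), ("Employment information", 1), ("Education information", 1)] := by rfl

theorem pvRank_le_two (s : String) : pvSeverityDict.getD s 0 ≤ 2 := by
  simp only [pvSev_mk, PySem.Dict.getD, PySem.Dict.get?, List.find?]
  repeat' split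
  all_goals simp

theorem pvRank_eq_two_iff (s : String) : pvSeverityDict.getD s 0 = 2 ↔ s ∈ pvHighRiskClasses := by
  simp only [pvSev_mk, PySem.Dict.getD, PySem.Dict.get?, List.find?]
  repeat' split
  all_goals (try simp only [beq_iff_eq] at *)
  all_goals (try subst_vars)
  all_goals (try decide)
  all_goals
    (simp only [Option.map_none, Option.getD_none, pvHighRiskClasses, List.mem_cons, List.not_mem_nil, or_false]
     constructor
     · intro h; exact absurd h (by decide)
     · rintro (rfl|rfl|rfl|rfl|rfl|rfl|rfl) <;> simp_all)

theorem pvRank_eq_one_iff (s : String) : pvSeverityDict.getD s 0 = 1 ↔ s ∈ pvMediumRiskClasses := by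
  simp only [pvSev_mk, PySem.Dict.getD, PySem.Dict.get?, List.find?]
  repeat' split
  all_goals (try simp only [beq_iff_eq] at *)
  all_goals (try subst_vars)
  all_goals (try decide)
  all_goals
    (simp only [Option.map_none, Option.getD_none, pvMediumRiskClasses, List.mem_cons, List.not_mem_nil, or_false]
     constructor
     · intro h; exact absurd h (by decide)
     · rintro (rfl|rfl|rfl|rfl|rfl|rfl|rfl) <;> simp_all)

-- B's running maximum is ≤ k iff the accumulator and every looked-up rank are ≤ k
theorem pvBest_le_iff (xs : List String) (n k : Nat) :
    xs.foldl (fun b cls => max b (pvSeverityDict.getD cls 0)) n ≤ k ↔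
      n ≤ k ∧ ∀ c ∈ xs, pvSeverityDict.getD c 0 ≤ k := by
  induction xs generalizing n with
  | nil => simp
  | cons c t ih =>
      simp only [List.foldl_cons, ih, List.mem_cons]
      constructor
      · rintro ⟨h1, h2⟩
        refine ⟨by omega, ?_⟩
        rintro x (rfl | hx)
        · omega
        · exact h2 x hx
      · rintro ⟨h1, h2⟩
        refine ⟨?_, fun x hx => h2 x (Or.inr hx)⟩
        have := h2 c (Or.inl rfl); omega

-- ===== VERDICT (by name: the statement is the Claim_ definition above) =====
theorem determine_breach_severity_spec : Claim_equal_determine_breach_severity := by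
  intro xs _
  unfold Spec_determine_breach_severity determine_breach_severity determine_breach_severity_alt
  by_cases hnil : xs = []
  · simp [hnil]
  · simp only [hnil, if_false]
    set best := xs.foldl (fun b cls => max b (pvSeverityDict.getD cls 0)) 0 with hbest
    have hle2 : best ≤ 2 := by
      rw [hbest, pvBest_le_iff]
      exact ⟨by omega, fun c _ => pvRank_le_two c⟩
    have hhi : pvHighRiskClasses.any (fun h => xs.contains h) = true ↔ best = 2 := by
      constructor
      · intro h
        simp only [List.any_eq_true, List.contains_eq_mem, decide_eq_true_eq] at h
        obtain ⟨hc, hcH, hcx⟩ := h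
        have h2 : pvSeverityDict.getD hc 0 = 2 := (pvRank_eq_two_iff hc).2 hcH
        have : ¬ best ≤ 1 := by
          rw [hbest, pvBest_le_iff]
          rintro ⟨-, hall⟩
          have := hall hc hcx; omega
        omega
      · intro h
        have hno : ¬ (0 ≤ 1 ∧ ∀ c ∈ xs, pvSeverityDict.getD c 0 ≤ 1) := by
          rw [← pvBest_le_iff xs 0 1, ← hbest]; omega
        push_neg at hno
        obtain ⟨c, hcx, hc1⟩ := hno (by omega)
        have hc2 : pvSeverityDict.getD c 0 = 2 := by have := pvRank_le_two c; omega
        simp only [List.any_eq_true, List.contains_eq_mem, decide_eq_true_eq]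
        exact ⟨c, (pvRank_eq_two_iff c).1 hc2, hcx⟩
    by_cases h2 : best = 2
    · rw [if_pos (hhi.2 h2), if_pos h2]
    · have hhif : pvHighRiskClasses.any (fun h => xs.contains h) = false := by
        rw [← Bool.not_eq_true]
        intro h; exact h2 (hhi.1 h)
      have hranks1 : ∀ c ∈ xs, pvSeverityDict.getD c 0 ≤ 1 := by
        intro c hcx
        have hle := pvRank_le_two c
        by_contra hgt
        have hc2 : pvSeverityDict.getD c 0 = 2 := by omega
        have hT : pvHighRiskClasses.any (fun h => xs.contains h) = true := by
          simp only [List.any_eq_true, List.contains_eq_mem, decide_eq_true_eq]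
          exact ⟨c, (pvRank_eq_two_iff c).1 hc2, hcx⟩
        exact absurd hT (by rw [hhif]; simp)
      have hle1 : best ≤ 1 := by
        rw [hbest, pvBest_le_iff]; exact ⟨by omega, hranks1⟩
      have hmed : pvMediumRiskClasses.any (fun m => xs.contains m) = true ↔ best = 1 := by
        constructor
        · intro h
          simp only [List.any_eq_true, List.contains_eq_mem, decide_eq_true_eq] at h
          obtain ⟨mc, hmH, hmx⟩ := h
          have hm1 : pvSeverityDict.getD mc 0 = 1 := (pvRank_eq_one_iff mc).2 hmH
          have : ¬ best ≤ 0 := by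
            rw [hbest, pvBest_le_iff]
            rintro ⟨-, hall⟩
            have := hall mc hmx; omega
          omega
        · intro h
          have hno : ¬ (0 ≤ 0 ∧ ∀ c ∈ xs, pvSeverityDict.getD c 0 ≤ 0) := by
            rw [← pvBest_le_iff xs 0 0, ← hbest]; omega
          push_neg at hno
          obtain ⟨c, hcx, hc0⟩ := hno (by omega)
          have hc1 : pvSeverityDict.getD c 0 = 1 := by
            have := hranks1 c hcx; omega
          simp only [List.any_eq_true, List.contains_eq_mem, decide_eq_true_eq]
          exact ⟨c, (pvRank_eq_one_iff c).1 hc1, hcx⟩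
      by_cases h1 : best = 1
      · rw [if_neg (by rw [hhif]; simp), if_pos (hmed.2 h1), if_neg h2, if_pos h1]
      · have hmedf : pvMediumRiskClasses.any (fun m => xs.contains m) = false := by
          rw [← Bool.not_eq_true]
          intro h; exact h1 (hmed.1 h)
        rw [if_neg (by rw [hhif]; simp), if_neg (by rw [hmedf]; simp), if_neg h2, if_neg h1]
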